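-- pv_equiv track=rewrite | github.com/fmata17/cs_foundations | algorithms/coding_challenges/usaco/watching_mooloo/solution.py | solution
-- ===== SOURCE A (Python) =====
-- def solution(n_days, K, days):
--     total = 0
--
--     start = days[0]
--     prev = days[0]
--
--     for i in range(1, n_days):
--         gap = days[i] - prev - 1
--
--         if gap > K:
--             total += (prev - start + 1) + K
--             start = days[i]
--
--         prev = days[i]
--
--     total += (prev - start + 1) + K
--     return total
-- ===== SOURCE B (Python) =====
-- def solution(n_days, K, days):
--     first = days[0]  # preserve the unconditional days[0] access
--     total = K + 1
--     for i in range(1, n_days):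
--         total += min(days[i] - days[i - 1], K + 1)
--     return total
-- ===== Notes on version B (the rewrite author's own statement) =====
-- stated objective: simpler
-- what changed: Replaces the group-boundary bookkeeping (start/prev state and per-group span additions) with a single running sum using the identity total = (K+1) + sum of min(days[i]-days[i-1], K+1).
import Mathlib
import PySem

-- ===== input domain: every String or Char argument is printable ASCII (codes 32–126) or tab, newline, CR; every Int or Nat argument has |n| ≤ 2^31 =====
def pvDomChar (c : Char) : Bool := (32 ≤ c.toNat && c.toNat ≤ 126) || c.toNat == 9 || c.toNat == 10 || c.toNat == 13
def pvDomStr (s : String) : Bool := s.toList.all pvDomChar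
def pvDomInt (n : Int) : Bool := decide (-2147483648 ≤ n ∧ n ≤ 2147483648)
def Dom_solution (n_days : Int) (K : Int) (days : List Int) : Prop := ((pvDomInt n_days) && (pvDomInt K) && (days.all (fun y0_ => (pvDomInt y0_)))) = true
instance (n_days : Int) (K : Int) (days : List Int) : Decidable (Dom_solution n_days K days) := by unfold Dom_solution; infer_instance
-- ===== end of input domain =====

-- B replaces A's group-boundary bookkeeping (start/prev state) with a single running
-- sum via the identity total = (K+1) + Σ min(days[i]-days[i-1], K+1); objective: simpler.


-- ===== PORT A =====
-- state = (total, start, prev); indices valid under Pre_, so pyGet? is defaulted with 0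
def solution (n_days : Int) (K : Int) (days : List Int) : Int :=
  let d0 : Int := (PySem.List.pyGet? days 0).getD 0
  let st := (PySem.List.pyRange 1 n_days 1).foldl
    (fun (st : Int × Int × Int) i =>
      let di := (PySem.List.pyGet? days i).getD 0
      let gap := di - st.2.2 - 1
      if gap > K then (st.1 + (st.2.2 - st.2.1 + 1) + K, di, di)
      else (st.1, st.2.1, di))
    (0, d0, d0)
  st.1 + (st.2.2 - st.2.1 + 1) + K

-- ===== PORT B =====
def solution_alt (n_days : Int) (K : Int) (days : List Int) : Int :=
  let _first : Int := (PySem.List.pyGet? days 0).getD 0  -- Python B binds days[0] (IndexError fidelity)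
  (PySem.List.pyRange 1 n_days 1).foldl
    (fun total i =>
      total + min ((PySem.List.pyGet? days i).getD 0 - (PySem.List.pyGet? days (i - 1)).getD 0) (K + 1))
    (K + 1)

-- ===== PRECONDITION & SPEC =====
-- A raises IndexError when days is empty (days[0]) or when n_days exceeds len(days)
-- (the loop reads days[i] for i < n_days); exactly those inputs are excluded.
def Pre_solution (n_days : Int) (K : Int) (days : List Int) : Prop :=
  days ≠ [] ∧ n_days ≤ (days.length : Int)
instance (n_days : Int) (K : Int) (days : List Int) : Decidable (Pre_solution n_days K days) := by
  unfold Pre_solution; infer_instance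
def pvWitness_solution : Int × Int × List Int := (4, 3, [1, 2, 7, 9])

def Spec_solution (n_days : Int) (K : Int) (days : List Int) (out : Int) : Prop := out = solution_alt n_days K days
instance (n_days : Int) (K : Int) (days : List Int) (out : Int) : Decidable (Spec_solution n_days K days out) := by unfold Spec_solution; infer_instance

-- ===== CLAIM (what is proved, stated in full; the proofs are below) =====
def Claim_equal_solution : Prop := ∀ (n_days : Int) (K : Int) (days : List Int), Dom_solution n_days K days → Pre_solution n_days K days → Spec_solution n_days K days (solution n_days K days)

-- ===== LEMMAS AND PROOFS =====

-- abbreviations for the two loop bodies, used only by the proofs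
def pvStepA (days : List Int) (K : Int) (st : Int × Int × Int) (i : Int) : Int × Int × Int :=
  let di := (PySem.List.pyGet? days i).getD 0
  let gap := di - st.2.2 - 1
  if gap > K then (st.1 + (st.2.2 - st.2.1 + 1) + K, di, di)
  else (st.1, st.2.1, di)

def pvStepB (days : List Int) (K : Int) (total : Int) (i : Int) : Int :=
  total + min ((PySem.List.pyGet? days i).getD 0 - (PySem.List.pyGet? days (i - 1)).getD 0) (K + 1)

-- invariant: after processing indices 1..m, prev = days[m] and
-- B's accumulator = A's total + (prev - start) + K + 1
theorem pv_invariant (days : List Int) (K : Int) (m : Nat) :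
    let d0 : Int := (PySem.List.pyGet? days 0).getD 0
    let stA := (PySem.List.pyRange 1 ((m : Int) + 1) 1).foldl (pvStepA days K) (0, d0, d0)
    let tB := (PySem.List.pyRange 1 ((m : Int) + 1) 1).foldl (pvStepB days K) (K + 1)
    stA.2.2 = (PySem.List.pyGet? days (m : Int)).getD 0 ∧
    tB = stA.1 + (stA.2.2 - stA.2.1) + K + 1 := by
  induction m with
  | zero =>
    simp [PySem.List.pyRange_one_eq_nil]
  | succ n ih =>
    have hsplit : PySem.List.pyRange 1 ((↑(n + 1) : Int) + 1) 1
        = PySem.List.pyRange 1 ((n : Int) + 1) 1 ++ [(n : Int) + 1] := by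
      have := PySem.List.pyRange_one_succ_right (a := 1) (b := (n : Int) + 1) (by omega)
      push_cast
      push_cast at this
      exact this
    simp only [hsplit, List.foldl_append, List.foldl_cons, List.foldl_nil]
    obtain ⟨hprev, hsum⟩ := ih
    set stA := (PySem.List.pyRange 1 ((n : Int) + 1) 1).foldl (pvStepA days K)
      (0, (PySem.List.pyGet? days 0).getD 0, (PySem.List.pyGet? days 0).getD 0) with hstA
    set tB := (PySem.List.pyRange 1 ((n : Int) + 1) 1).foldl (pvStepB days K) (K + 1) with htB
    simp only [pvStepA, pvStepB]
    have hidx : ((n : Int) + 1 - 1) = (n : Int) := by omega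
    rw [hidx, ← hprev]
    by_cases h : (PySem.List.pyGet? days ((n : Int) + 1)).getD 0 - stA.2.2 - 1 > K
    · simp only [if_pos h]
      constructor
      · simp
      · have : min ((PySem.List.pyGet? days ((n : Int) + 1)).getD 0 - stA.2.2) (K + 1) = K + 1 := by
          omega
        rw [this]; omega
    · simp only [if_neg h]
      constructor
      · simp
      · have : min ((PySem.List.pyGet? days ((n : Int) + 1)).getD 0 - stA.2.2) (K + 1)
            = (PySem.List.pyGet? days ((n : Int) + 1)).getD 0 - stA.2.2 := by
          omega
        rw [this]; omega

-- ===== VERDICT (by name: the statement is the Claim_ definition above) =====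
theorem solution_spec : Claim_equal_solution := by
  intro n_days K days _hdom _hpre
  unfold Spec_solution solution solution_alt
  by_cases h : n_days ≤ 1
  · simp [PySem.List.pyRange_one_eq_nil h]
    omega
  · -- n_days = m + 1 for some natural m
    obtain ⟨m, hm⟩ : ∃ m : Nat, n_days = (m : Int) + 1 := by
      refine ⟨(n_days - 1).toNat, ?_⟩; omega
    have := pv_invariant days K m
    simp only at this
    obtain ⟨_, hsum⟩ := this
    simp only [hm]
    -- both folds are over pyRange 1 (m+1); identify the bodies with pvStepA/pvStepB
    have hA : (PySem.List.pyRange 1 ((m:Int) + 1) 1).foldl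
        (fun (st : Int × Int × Int) i =>
          let di := (PySem.List.pyGet? days i).getD 0
          let gap := di - st.2.2 - 1
          if gap > K then (st.1 + (st.2.2 - st.2.1 + 1) + K, di, di)
          else (st.1, st.2.1, di))
        (0, (PySem.List.pyGet? days 0).getD 0, (PySem.List.pyGet? days 0).getD 0)
        = (PySem.List.pyRange 1 ((m:Int) + 1) 1).foldl (pvStepA days K)
        (0, (PySem.List.pyGet? days 0).getD 0, (PySem.List.pyGet? days 0).getD 0) := rfl
    have hB : (PySem.List.pyRange 1 ((m:Int) + 1) 1).foldl
        (fun total i =>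
          total + min ((PySem.List.pyGet? days i).getD 0 - (PySem.List.pyGet? days (i - 1)).getD 0) (K + 1))
        (K + 1)
        = (PySem.List.pyRange 1 ((m:Int) + 1) 1).foldl (pvStepB days K) (K + 1) := rfl
    rw [hA, hB, hsum]
    omega
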